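-- pv_equiv track=rewrite | github.com/jKaleba/WDI | Z1/Z1.py | fibonacciLimWithInitials
-- ===== SOURCE A (Python) =====
-- def fibonacciLimWithInitials(iterations: int, a: int, b: int):
--     product = a * b
--     for i in range(iterations):
--         c = a + b
--         a = b
--         b = c
--         product = a * b
--
--     return product
-- ===== SOURCE B (Python) =====
-- def _fib_pair(n):
--     # fast doubling: returns (F(n), F(n+1))
--     if n == 0:
--         return (0, 1)
--     f, g = _fib_pair(n // 2)
--     c = f * (2 * g - f)
--     d = f * f + g * g
--     if n % 2 == 0:
--         return (c, d)
--     else: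
--         return (d, c + d)
--
--
-- def fibonacciLimWithInitials(iterations: int, a: int, b: int):
--     n = iterations if iterations > 0 else 0
--     f, g = _fib_pair(n)
--     an = a * (g - f) + b * f
--     bn = a * f + b * g
--     return an * bn
-- ===== Notes on version B (the rewrite author's own statement) =====
-- stated objective: faster
-- what changed: Replaces the O(n) iterative Fibonacci loop by fast-doubling: the nth pair (F(n), F(n+1)) is computed in O(log n) multiplications and the two generalized terms a*F(n-1)+b*F(n) and a*F(n)+b*F(n+1) are multiplied directly.
import Mathlib
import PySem

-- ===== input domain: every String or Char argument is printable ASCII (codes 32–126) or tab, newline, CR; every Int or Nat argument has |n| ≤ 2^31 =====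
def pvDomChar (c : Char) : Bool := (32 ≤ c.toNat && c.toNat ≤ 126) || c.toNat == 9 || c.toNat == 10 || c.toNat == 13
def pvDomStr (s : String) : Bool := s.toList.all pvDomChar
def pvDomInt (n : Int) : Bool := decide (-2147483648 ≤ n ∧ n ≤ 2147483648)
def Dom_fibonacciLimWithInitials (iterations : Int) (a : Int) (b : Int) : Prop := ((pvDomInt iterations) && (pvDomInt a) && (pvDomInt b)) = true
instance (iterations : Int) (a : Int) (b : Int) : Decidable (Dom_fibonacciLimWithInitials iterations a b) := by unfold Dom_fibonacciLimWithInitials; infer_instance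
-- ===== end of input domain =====

-- B replaces A's O(n) Fibonacci loop by fast doubling (O(log n) multiplications); objective: faster.

-- ===== PORT A =====
-- literal port of A: product = a*b; for i in range(iterations): c=a+b; a=b; b=c; product=a*b
def fibonacciLimWithInitials (iterations : Int) (a : Int) (b : Int) : Int :=
  let product := a * b
  let st := (PySem.List.pyRange 0 iterations 1).foldl
    (fun (st : Int × Int × Int) _ =>
      let a := st.1
      let b := st.2.1
      let c := a + b
      let a := b
      let b := c
      (a, b, a * b)) (a, b, product)
  st.2.2

-- ===== PORT B =====
-- fast doubling: fibPair n = (F(n), F(n+1))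
def fibPair (n : Nat) : Int × Int :=
  if _h : n = 0 then (0, 1)
  else
    let p := fibPair (n / 2)
    let f := p.1
    let g := p.2
    let c := f * (2 * g - f)
    let d := f * f + g * g
    if n % 2 == 0 then (c, d) else (d, c + d)
termination_by n
decreasing_by exact Nat.div_lt_self (Nat.pos_of_ne_zero _h) (by norm_num)

def fibonacciLimWithInitials_alt (iterations : Int) (a : Int) (b : Int) : Int :=
  let n : Nat := (if iterations > 0 then iterations else 0).toNat
  let p := fibPair n
  let f := p.1
  let g := p.2
  let an := a * (g - f) + b * f
  let bn := a * f + b * g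
  an * bn

-- ===== PRECONDITION & SPEC =====
def Spec_fibonacciLimWithInitials (iterations : Int) (a : Int) (b : Int) (out : Int) : Prop := out = fibonacciLimWithInitials_alt iterations a b
instance (iterations : Int) (a : Int) (b : Int) (out : Int) : Decidable (Spec_fibonacciLimWithInitials iterations a b out) := by unfold Spec_fibonacciLimWithInitials; infer_instance

-- ===== CLAIM (what is proved, stated in full; the proofs are below) =====
def Claim_equal_fibonacciLimWithInitials : Prop := ∀ (iterations : Int) (a : Int) (b : Int), Dom_fibonacciLimWithInitials iterations a b → Spec_fibonacciLimWithInitials iterations a b (fibonacciLimWithInitials iterations a b)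

-- ===== LEMMAS AND PROOFS =====

-- fast doubling computes the Fibonacci pair
theorem fibPair_eq (n : Nat) : fibPair n = ((Nat.fib n : Int), (Nat.fib (n + 1) : Int)) := by
  induction n using Nat.strong_induction_on with
  | _ n ih =>
    rw [fibPair]
    by_cases h : n = 0
    · simp [h]
    · simp only [h, dite_false]
      rw [ih (n / 2) (Nat.div_lt_self (Nat.pos_of_ne_zero h) (by norm_num))]
      have hle : Nat.fib (n / 2) ≤ 2 * Nat.fib (n / 2 + 1) := by
        have h0 : Nat.fib (n / 2) ≤ Nat.fib (n / 2 + 1) := Nat.fib_mono (Nat.le_succ _)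
        omega
      rcases Nat.even_or_odd n with he | ho
      · obtain ⟨m, hm⟩ := he
        have hmod : n % 2 = 0 := by omega
        have hdiv : n / 2 = m := by omega
        simp only [hmod, hdiv, beq_self_eq_true, if_true]
        have h2m : n = 2 * m := by omega
        have h1 : Nat.fib n = Nat.fib m * (2 * Nat.fib (m + 1) - Nat.fib m) := by
          rw [h2m, Nat.fib_two_mul]
        have h2 : Nat.fib (n + 1) = Nat.fib (m + 1) ^ 2 + Nat.fib m ^ 2 := by
          rw [show n + 1 = 2 * m + 1 by omega, Nat.fib_two_mul_add_one]
        have hle' : Nat.fib m ≤ 2 * Nat.fib (m + 1) := by rw [← hdiv]; exact hle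
        rw [h1, h2]
        simp only [Prod.mk.injEq]
        constructor <;> (push_cast [Nat.cast_sub hle']; ring)
      · obtain ⟨m, hm⟩ := ho
        have hmod : n % 2 = 1 := by omega
        have hdiv : n / 2 = m := by omega
        simp only [hmod, hdiv]
        norm_num
        have h1 : Nat.fib n = Nat.fib (m + 1) ^ 2 + Nat.fib m ^ 2 := by
          rw [hm, Nat.fib_two_mul_add_one]
        have h2 : Nat.fib (n + 1) = Nat.fib m * (2 * Nat.fib (m + 1) - Nat.fib m) + (Nat.fib (m + 1) ^ 2 + Nat.fib m ^ 2) := by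
          rw [show n + 1 = 2 * m + 2 by omega]
          rw [show 2 * m + 2 = (2 * m) + 1 + 1 from rfl, Nat.fib_add_two,
            Nat.fib_two_mul, Nat.fib_two_mul_add_one]
        have hle' : Nat.fib m ≤ 2 * Nat.fib (m + 1) := by rw [← hdiv]; exact hle
        rw [h1, h2]
        constructor <;> (push_cast [Nat.cast_sub hle']; ring)

-- a constant-body foldl is an iterate of the step
theorem foldl_const_iterate {α β : Type} (g : α → α) (l : List β) (s : α) :
    l.foldl (fun s _ => g s) s = g^[l.length] s := by
  induction l generalizing s with
  | nil => rfl
  | cons x xs ih => simp [List.foldl_cons, ih, Function.iterate_succ_apply]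

-- the loop invariant: after k iterations the state is expressed via Fibonacci numbers
theorem loop_invariant (a b : Int) (k : Nat) :
    (fun (st : Int × Int × Int) =>
      (st.2.1, st.1 + st.2.1, st.2.1 * (st.1 + st.2.1)))^[k] (a, b, a * b) =
    (a * ((Nat.fib (k + 1) : Int) - (Nat.fib k : Int)) + b * (Nat.fib k : Int),
     a * (Nat.fib k : Int) + b * (Nat.fib (k + 1) : Int),
     (a * ((Nat.fib (k + 1) : Int) - (Nat.fib k : Int)) + b * (Nat.fib k : Int)) *
       (a * (Nat.fib k : Int) + b * (Nat.fib (k + 1) : Int))) := by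
  induction k with
  | zero => simp
  | succ k ih =>
    rw [Function.iterate_succ_apply', ih]
    simp only [Prod.mk.injEq]
    have hfib : (Nat.fib (k + 2) : Int) = (Nat.fib k : Int) + (Nat.fib (k + 1) : Int) := by
      rw [Nat.fib_add_two]; push_cast; ring
    refine ⟨by rw [hfib]; ring, by rw [hfib]; ring, by rw [hfib]; ring⟩

-- ===== VERDICT (by name: the statement is the Claim_ definition above) =====
theorem fibonacciLimWithInitials_spec : Claim_equal_fibonacciLimWithInitials := by
  intro iterations a b _
  show _ = _
  unfold fibonacciLimWithInitials fibonacciLimWithInitials_alt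
  simp only []
  have hstep : (fun (st : Int × Int × Int) _ =>
      let a := st.1
      let b := st.2.1
      let c := a + b
      let a := b
      let b := c
      (a, b, a * b)) = (fun (st : Int × Int × Int) (_ : Int) =>
      (st.2.1, st.1 + st.2.1, st.2.1 * (st.1 + st.2.1))) := rfl
  rw [hstep, foldl_const_iterate, PySem.List.length_pyRange_one]
  have hn : (if iterations > 0 then iterations else 0).toNat = (iterations - 0).toNat := by
    split <;> omega
  rw [← hn, loop_invariant, fibPair_eq]
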